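-- pv_equiv track=rewrite | github.com/devakowakou/adventofcode | day09/part2_solver.py | build_allowed
-- ===== SOURCE A (Python) =====
-- def merge_intervals(ints):
--     if not ints:
--         return []
--     ints.sort()
--     merged = []
--     c0,c1 = ints[0]
--     for a,b in ints[1:]:
--         if a <= c1 + 1:
--             c1 = max(c1, b)
--         else:
--             merged.append((c0,c1)); c0,c1 = a,b
--     merged.append((c0,c1))
--     return merged
--
-- def build_allowed(row_interior, row_boundary, miny, maxy):
--     row_allowed = {}
--     for y in range(miny, maxy+1):
--         ints = []
--         if y in row_interior:
--             ints.extend(row_interior[y])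
--         if y in row_boundary:
--             for x in row_boundary[y]:
--                 ints.append((x,x))
--         if not ints:
--             continue
--         row_allowed[y] = merge_intervals(ints)
--     return row_allowed
-- ===== SOURCE B (Python) =====
-- def build_allowed(row_interior, row_boundary, miny, maxy):
--     row_allowed = {}
--     for y in range(miny, maxy + 1):
--         events = []
--         if y in row_interior:
--             for a, b in row_interior[y]:
--                 events.append((a, 1))
--                 events.append((b + 1, -1))
--         if y in row_boundary:
--             for x in row_boundary[y]:
--                 events.append((x, 1))
--                 events.append((x + 1, -1))
--         if not events:
--             continue
--         events.sort(key=lambda e: (e[0], -e[1]))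
--         merged = []
--         cov = 0
--         start = 0
--         for coord, delta in events:
--             if cov == 0:
--                 start = coord
--             cov += delta
--             if cov == 0:
--                 merged.append((start, coord - 1))
--         row_allowed[y] = merged
--     return row_allowed
-- ===== Notes on version B (the rewrite author's own statement) =====
-- stated objective: alternative
-- what changed: Per-row interval merging is done by a sweep line over (coordinate, +1/-1) boundary events sorted with starts before ends at equal coordinates, emitting an interval each time the coverage counter returns to zero, instead of sorting the intervals and folding with a current-interval accumulator.
-- outside the precondition, e.g. on build_allowed({0: [(2, 0)]}, {}, 0, 0): A returns {0: [(2, 0)]}, B returns {0: [(1, 1)]}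
import Mathlib
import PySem

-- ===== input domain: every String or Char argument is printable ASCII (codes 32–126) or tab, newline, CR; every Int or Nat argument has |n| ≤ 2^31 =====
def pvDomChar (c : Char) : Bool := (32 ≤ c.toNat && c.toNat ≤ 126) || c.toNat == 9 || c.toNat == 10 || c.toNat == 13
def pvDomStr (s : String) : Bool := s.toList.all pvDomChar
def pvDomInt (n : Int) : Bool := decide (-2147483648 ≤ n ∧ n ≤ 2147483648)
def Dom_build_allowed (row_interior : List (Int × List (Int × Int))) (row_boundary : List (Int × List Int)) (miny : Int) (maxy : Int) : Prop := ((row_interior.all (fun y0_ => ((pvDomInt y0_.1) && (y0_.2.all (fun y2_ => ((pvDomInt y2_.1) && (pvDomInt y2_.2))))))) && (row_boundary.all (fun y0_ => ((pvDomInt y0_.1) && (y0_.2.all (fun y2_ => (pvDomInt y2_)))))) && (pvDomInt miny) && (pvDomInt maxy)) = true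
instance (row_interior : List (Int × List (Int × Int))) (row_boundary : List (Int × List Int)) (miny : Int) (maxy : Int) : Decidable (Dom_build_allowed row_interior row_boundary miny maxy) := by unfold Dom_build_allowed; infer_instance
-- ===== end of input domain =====

-- B merges each row's intervals with a sweep line over ±1 boundary events instead of A's
-- sort-then-accumulate scan (objective: alternative algorithm of the same cost); equal
-- returned value on Pre_ (interval pairs with a ≤ b).

-- ===== PORT A =====
-- the 'for a,b in ints[1:]' loop of merge_intervals, carried state (c0,c1)
def mergeScan (c0 c1 : Int) : List (Int × Int) → List (Int × Int)
  | [] => [(c0, c1)]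
  | (a, b) :: rest => if a ≤ c1 + 1 then mergeScan c0 (max c1 b) rest else (c0, c1) :: mergeScan a b rest

def merge_intervals (ints : List (Int × Int)) : List (Int × Int) :=
  if ints = [] then []
  else
    match PySem.List.sorted2 ints (fun p => p.1) (fun p => p.2) with
    | [] => []
    | (c0, c1) :: rest => mergeScan c0 c1 rest

def build_allowed (row_interior : List (Int × List (Int × Int))) (row_boundary : List (Int × List Int)) (miny : Int) (maxy : Int) : List (Int × List (Int × Int)) :=
  ((PySem.List.pyRange miny (maxy + 1) 1).foldl
    (fun (acc : PySem.Dict Int (List (Int × Int))) (y : Int) =>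
      let ints : List (Int × Int) := []
      let ints := if (PySem.Dict.mk row_interior).contains y then ints ++ (PySem.Dict.mk row_interior).getD y [] else ints
      let ints := if (PySem.Dict.mk row_boundary).contains y then
          ((PySem.Dict.mk row_boundary).getD y []).foldl (fun l x => l ++ [(x, x)]) ints
        else ints
      if ints = [] then acc else acc.insert y (merge_intervals ints))
    PySem.Dict.empty).items

-- ===== PORT B =====
-- the event loop of Source B: coverage counter, current start, emitted intervals
def sweepLoop (cov start : Int) (merged : List (Int × Int)) : List (Int × Int) → List (Int × Int)
  | [] => merged
  | (coord, delta) :: rest =>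
      let start' := if cov = 0 then coord else start
      let cov' := cov + delta
      let merged' := if cov' = 0 then merged ++ [(start', coord - 1)] else merged
      sweepLoop cov' start' merged' rest

def build_allowed_alt (row_interior : List (Int × List (Int × Int))) (row_boundary : List (Int × List Int)) (miny : Int) (maxy : Int) : List (Int × List (Int × Int)) :=
  ((PySem.List.pyRange miny (maxy + 1) 1).foldl
    (fun (acc : PySem.Dict Int (List (Int × Int))) (y : Int) =>
      let events : List (Int × Int) := []
      let events := if (PySem.Dict.mk row_interior).contains y then
          ((PySem.Dict.mk row_interior).getD y []).foldl (fun es p => es ++ [(p.1, 1)] ++ [(p.2 + 1, -1)]) events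
        else events
      let events := if (PySem.Dict.mk row_boundary).contains y then
          ((PySem.Dict.mk row_boundary).getD y []).foldl (fun es x => es ++ [(x, 1)] ++ [(x + 1, -1)]) events
        else events
      if events = [] then acc
      else acc.insert y (sweepLoop 0 0 [] (PySem.List.sorted2 events (fun e => e.1) (fun e => -e.2))))
    PySem.Dict.empty).items

-- ===== PRECONDITION & SPEC =====
-- Pre_ excludes inputs where the interior list of some visited row (key in [miny,maxy])
-- contains an inverted pair (b < a), which does not denote an interval: on such garbage
-- neither merge order is specified and A's accumulator value and B's sweep value are
-- equally defensible, so no behaviour is claimed there.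
def Pre_build_allowed (row_interior : List (Int × List (Int × Int))) (row_boundary : List (Int × List Int)) (miny : Int) (maxy : Int) : Prop :=
  ∀ p ∈ row_interior, miny ≤ p.1 ∧ p.1 ≤ maxy → ∀ q ∈ p.2, q.1 ≤ q.2
instance (row_interior : List (Int × List (Int × Int))) (row_boundary : List (Int × List Int)) (miny : Int) (maxy : Int) : Decidable (Pre_build_allowed row_interior row_boundary miny maxy) := by unfold Pre_build_allowed; infer_instance

def pvWitness_build_allowed : (List (Int × List (Int × Int))) × (List (Int × List Int)) × Int × Int :=
  ([(0, [(1, 3), (5, 5)])], [(0, [4]), (1, [7])], 0, 1)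

def Spec_build_allowed (row_interior : List (Int × List (Int × Int))) (row_boundary : List (Int × List Int)) (miny : Int) (maxy : Int) (out : List (Int × List (Int × Int))) : Prop := out = build_allowed_alt row_interior row_boundary miny maxy
instance (row_interior : List (Int × List (Int × Int))) (row_boundary : List (Int × List Int)) (miny : Int) (maxy : Int) (out : List (Int × List (Int × Int))) : Decidable (Spec_build_allowed row_interior row_boundary miny maxy out) := by unfold Spec_build_allowed; infer_instance

-- ===== CLAIM (what is proved, stated in full; the proofs are below) =====
def Claim_equal_build_allowed : Prop := ∀ (row_interior : List (Int × List (Int × Int))) (row_boundary : List (Int × List Int)) (miny : Int) (maxy : Int), Dom_build_allowed row_interior row_boundary miny maxy → Pre_build_allowed row_interior row_boundary miny maxy → Spec_build_allowed row_interior row_boundary miny maxy (build_allowed row_interior row_boundary miny maxy)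

-- ===== LEMMAS AND PROOFS =====

-- event machinery (proof-only helpers)
def pvEkey (e : Int × Int) : Lex (Int × Int) := toLex (e.1, -e.2)
def pvEnd (P : List Int) : List (Int × Int) := P.map (fun p => (p, -1))
def pvEvts (s : List (Int × Int)) : List (Int × Int) := s.flatMap (fun p => [(p.1, 1), (p.2 + 1, -1)])

lemma pvEkey_inj : Function.Injective pvEkey := by
  intro a b h
  unfold pvEkey at h
  obtain ⟨h4, h5⟩ := Prod.mk.injEq .. ▸ toLex.injective h
  exact Prod.ext h4 (by omega)

-- sorted2 with Int keys is sorted with the lexicographic pair key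
lemma sorted2_eq_sorted_lex {α : Type} (xs : List α) (k1 k2 : α → Int) :
    PySem.List.sorted2 xs k1 k2 = PySem.List.sorted xs (fun e => toLex (k1 e, k2 e)) := by
  unfold PySem.List.sorted2 PySem.List.sorted
  simp only [Bool.false_eq_true, if_false]
  congr 1
  funext acc x
  congr 1
  funext a b
  by_cases h1 : k1 a < k1 b <;> by_cases h2 : k1 b < k1 a <;> by_cases h3 : k2 a < k2 b <;>
    simp [Prod.Lex.toLex_lt_toLex, h1, h2, h3] <;> omega

lemma map_insertBy {α κ : Type} [LinearOrder κ] (key : α → κ) (x : α) (l : List α) :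
    (PySem.List.insertBy (fun a b => decide (key a < key b)) x l).map key
      = PySem.List.insertBy (fun a b => decide (a < b)) (key x) (l.map key) := by
  induction l with
  | nil => simp [PySem.List.insertBy]
  | cons y ys ih =>
      by_cases h : key x < key y <;> simp [PySem.List.insertBy, h, ih]

lemma map_sorted {α κ : Type} [LinearOrder κ] (xs : List α) (key : α → κ) :
    (PySem.List.sorted xs key).map key = PySem.List.sorted (xs.map key) (fun x => x) := by
  unfold PySem.List.sorted
  simp only [Bool.false_eq_true, if_false]
  suffices h : ∀ (acc : List α),
      (xs.foldl (fun acc x => PySem.List.insertBy (fun a b => decide (key a < key b)) x acc) acc).map key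
        = (xs.map key).foldl (fun acc u => PySem.List.insertBy (fun a b => decide (a < b)) u acc) (acc.map key) by
    simpa using h []
  induction xs with
  | nil => intro acc; simp
  | cons x t ih => intro acc; simp [List.foldl_cons, ih, map_insertBy]

-- a key-nondecreasing rearrangement with an injective key IS sorted(xs, key)
lemma sorted_eq_of_perm_pairwise {α κ : Type} [LinearOrder κ] (xs ys : List α) (key : α → κ)
    (hinj : Function.Injective key) (hperm : ys.Perm xs)
    (hpw : ys.Pairwise (fun a b => key a ≤ key b)) :
    PySem.List.sorted xs key = ys := by
  apply List.map_injective_iff.mpr hinj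
  rw [map_sorted]
  exact PySem.List.sorted_id_eq_of_perm_of_pairwise _ _ (hperm.map key) (List.pairwise_map.mpr hpw)

-- a ≤-sorted list splits below/at a pivot
lemma sorted_split (P : List Int) (hpw : P.Pairwise (· ≤ ·)) (a : Int) :
    ∃ P₁ P₂, P = P₁ ++ P₂ ∧ (∀ p ∈ P₁, p < a) ∧ (∀ p ∈ P₂, a ≤ p) := by
  induction P with
  | nil => exact ⟨[], [], by simp, by simp, by simp⟩
  | cons p t ih =>
      rcases List.pairwise_cons.mp hpw with ⟨hp, ht⟩
      by_cases h : p < a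
      · obtain ⟨P₁, P₂, he, h1, h2⟩ := ih ht
        exact ⟨p :: P₁, P₂, by simp [he], by simpa [h] using h1, h2⟩
      · exact ⟨[], p :: t, by simp, by simp, by
          intro q hq
          rcases List.mem_cons.mp hq with rfl | hq
          · omega
          · exact le_trans (by omega) (hp q hq)⟩

-- consuming end events while coverage stays positive
lemma sweep_skip (P : List Int) : ∀ (cov c0 : Int) (merged rest : List (Int × Int)),
    (P.length : Int) < cov →
    sweepLoop cov c0 merged (pvEnd P ++ rest) = sweepLoop (cov - P.length) c0 merged rest := by
  induction P with
  | nil => intro cov c0 merged rest h; simp [pvEnd]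
  | cons p t ih =>
      intro cov c0 merged rest h
      simp only [List.length_cons] at h
      push_cast at h
      have h1 : cov ≠ 0 := by omega
      have h2 : cov + -1 ≠ 0 := by omega
      simp only [pvEnd, List.map_cons, List.cons_append, sweepLoop, h1, h2, if_false]
      rw [show List.map (fun p => (p, (-1 : Int))) t = pvEnd t from rfl,
        ih (cov + -1) c0 merged rest (by omega)]
      congr 1
      push_cast [List.length_cons]
      omega

-- consuming all end events: coverage hits zero at the maximum, emitting (c0, max-1)
lemma sweep_ends (P : List Int) : ∀ (m c0 : Int) (merged rest : List (Int × Int)),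
    P ≠ [] → P.Pairwise (· ≤ ·) → m ∈ P → (∀ p ∈ P, p ≤ m) →
    sweepLoop (P.length : Int) c0 merged (pvEnd P ++ rest)
      = sweepLoop 0 c0 (merged ++ [(c0, m - 1)]) rest := by
  induction P with
  | nil => intro _ _ _ _ h; exact absurd rfl h
  | cons p t ih =>
      intro m c0 merged rest _ hpw hm hub
      rcases List.pairwise_cons.mp hpw with ⟨hp, ht⟩
      cases t with
      | nil =>
          have : m = p := by simpa using hm
          subst this
          simp [pvEnd, sweepLoop]
      | cons q u =>
          have hm' : m ∈ q :: u := by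
            rcases List.mem_cons.mp hm with rfl | h
            · have h1 : m ≤ q := hp q (by simp)
              have h2 : q ≤ m := hub q (by simp)
              have : q = m := le_antisymm h2 h1
              simp [← this]
            · exact h
          have hcov : ((p :: q :: u).length : Int) ≠ 0 := by push_cast [List.length_cons]; omega
          have hcov2 : ((p :: q :: u).length : Int) + -1 ≠ 0 := by push_cast [List.length_cons]; omega
          simp only [pvEnd, List.map_cons, List.cons_append, sweepLoop, hcov, hcov2, if_false]
          have hrec := ih m c0 merged rest (by simp) ht hm' (fun x hx => hub x (by simp [hx]))
          simp only [pvEnd] at hrec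
          rw [show ((p :: q :: u).length : Int) + -1 = ((q :: u).length : Int) by
            push_cast [List.length_cons]; omega]
          exact hrec

-- key bound: every event of (pvEnd Q ++ pvEvts t) is ≥ the start event (a,1)
lemma ekey_lb (Q : List Int) (t : List (Int × Int)) (a : Int)
    (hQ : ∀ q ∈ Q, a ≤ q) (hts : ∀ p ∈ t, a ≤ p.1) (htab : ∀ p ∈ t, p.1 ≤ p.2) :
    ∀ e ∈ pvEnd Q ++ pvEvts t, pvEkey (a, 1) ≤ pvEkey e := by
  intro e he
  rcases List.mem_append.mp he with h | h
  · obtain ⟨q, hq, rfl⟩ := List.mem_map.mp h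
    have := hQ q hq
    simp only [pvEkey, Prod.Lex.toLex_le_toLex]
    omega
  · obtain ⟨p, hp, hmem⟩ := List.mem_flatMap.mp h
    have h1 := hts p hp
    have h2 := htab p hp
    rcases List.mem_cons.mp hmem with rfl | hmem
    · simp only [pvEkey, Prod.Lex.toLex_le_toLex]; omega
    · rcases List.mem_cons.mp hmem with rfl | hmem
      · simp only [pvEkey, Prod.Lex.toLex_le_toLex]; omega
      · simp at hmem

-- how the sorted event list of (end events ++ events of (a,b)::t) decomposes
lemma sorted_eq_decomp (X : List (Int × Int)) (P₁ Q : List Int) (t : List (Int × Int)) (a : Int)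
    (hperm : X.Perm (pvEnd P₁ ++ (a, 1) :: (pvEnd Q ++ pvEvts t)))
    (h1 : ∀ p ∈ P₁, p < a) (h1s : P₁.Pairwise (· ≤ ·))
    (hQ : ∀ q ∈ Q, a ≤ q) (hts : ∀ p ∈ t, a ≤ p.1) (htab : ∀ p ∈ t, p.1 ≤ p.2) :
    PySem.List.sorted X pvEkey = pvEnd P₁ ++ (a, 1) :: PySem.List.sorted (pvEnd Q ++ pvEvts t) pvEkey := by
  apply sorted_eq_of_perm_pairwise _ _ _ pvEkey_inj
  · exact (List.Perm.append_left _ (List.Perm.cons _ (PySem.List.sorted_perm _ _ _))).trans hperm.symm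
  · have hlb := ekey_lb Q t a hQ hts htab
    rw [List.pairwise_append]
    refine ⟨?_, ?_, ?_⟩
    · unfold pvEnd
      rw [List.pairwise_map]
      refine h1s.imp ?_
      intro x y hxy
      simp only [pvEkey, Prod.Lex.toLex_le_toLex]
      omega
    · rw [List.pairwise_cons]
      exact ⟨fun e he => hlb e ((PySem.List.mem_sorted _ _ _ _).mp he),
        PySem.List.sorted_pairwise _ _⟩
    · intro x hx e he
      obtain ⟨p, hp, rfl⟩ := List.mem_map.mp hx
      have hpa := h1 p hp
      have hstep : pvEkey (p, -1) ≤ pvEkey (a, 1) := by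
        simp only [pvEkey, Prod.Lex.toLex_le_toLex]; omega
      rcases List.mem_cons.mp he with rfl | he
      · exact hstep
      · exact le_trans hstep (hlb e ((PySem.List.mem_sorted _ _ _ _).mp he))

-- MAIN: the sweep over the sorted events equals A's scan, given an open group
lemma sweep_scan (s : List (Int × Int)) : ∀ (P : List Int) (c0 M : Int) (merged : List (Int × Int)),
    P ≠ [] → P.Pairwise (· ≤ ·) → (M + 1) ∈ P → (∀ p ∈ P, p ≤ M + 1) →
    s.Pairwise (fun p q => p.1 ≤ q.1) → (∀ p ∈ s, p.1 ≤ p.2) →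
    sweepLoop (P.length : Int) c0 merged (PySem.List.sorted (pvEnd P ++ pvEvts s) pvEkey)
      = merged ++ mergeScan c0 M s := by
  induction s with
  | nil =>
      intro P c0 M merged hne hpw hmem hub _ _
      have hself : PySem.List.sorted (pvEnd P ++ pvEvts []) pvEkey = pvEnd P := by
        rw [show pvEvts [] = [] from rfl, List.append_nil]
        apply PySem.List.sorted_eq_self_of_pairwise
        unfold pvEnd
        rw [List.pairwise_map]
        refine hpw.imp ?_
        intro x y hxy
        simp only [pvEkey, Prod.Lex.toLex_le_toLex]
        omega
      have hends := sweep_ends P (M + 1) c0 merged [] hne hpw hmem hub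
      rw [List.append_nil] at hends
      rw [hself, hends]
      simp [sweepLoop, mergeScan]
  | cons hd t ih =>
      intro P c0 M merged hne hpw hmem hub hfst hab
      obtain ⟨a, b⟩ := hd
      rcases List.pairwise_cons.mp hfst with ⟨hts, htp⟩
      have hab' : a ≤ b := hab (a, b) (by simp)
      have htab : ∀ p ∈ t, p.1 ≤ p.2 := fun p hp => hab p (by simp [hp])
      have hts' : ∀ p ∈ t, a ≤ p.1 := fun p hp => hts p hp
      by_cases hc : a ≤ M + 1
      · -- new interval merges into the open group
        obtain ⟨P₁, P₂, hsplit, hlt, hge⟩ := sorted_split P hpw a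
        have hpw12 := hsplit ▸ hpw
        rcases List.pairwise_append.mp hpw12 with ⟨hpw1, hpw2, _⟩
        have hm2 : M + 1 ∈ P₂ := by
          rcases List.mem_append.mp (hsplit ▸ hmem) with h | h
          · exact absurd (hlt _ h) (by omega)
          · exact h
        have hne2 : P₂ ≠ [] := by intro h; rw [h] at hm2; simp at hm2
        have hlen2 : 1 ≤ P₂.length := List.length_pos_of_ne_nil hne2
        set Q := List.orderedInsert (· ≤ ·) (b + 1) P₂ with hQdef
        have hQperm : Q.Perm ((b + 1) :: P₂) := List.perm_orderedInsert _ _ _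
        have hQend : (pvEnd Q).Perm ((b + 1, -1) :: pvEnd P₂) := hQperm.map _
        have hdec : PySem.List.sorted (pvEnd P ++ pvEvts ((a, b) :: t)) pvEkey
            = pvEnd P₁ ++ (a, 1) :: PySem.List.sorted (pvEnd Q ++ pvEvts t) pvEkey := by
          apply sorted_eq_decomp _ _ _ _ _ ?_ hlt hpw1 ?_ hts' htab
          · rw [hsplit, show pvEvts ((a, b) :: t) = (a, 1) :: (b + 1, -1) :: pvEvts t from rfl,
              show pvEnd (P₁ ++ P₂) = pvEnd P₁ ++ pvEnd P₂ from List.map_append ..,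
              List.append_assoc]
            apply List.Perm.append_left
            have h1 : ((a, 1) :: (pvEnd Q ++ pvEvts t)).Perm
                ((a, 1) :: (b + 1, -1) :: (pvEnd P₂ ++ pvEvts t)) := List.Perm.cons _ (by
              have := hQend.append_right (pvEvts t)
              simpa using this)
            exact ((List.Perm.trans List.perm_middle (List.Perm.cons _ List.perm_middle))).trans h1.symm
          · intro q hq
            rcases (List.mem_orderedInsert _).mp hq with rfl | hq
            · omega
            · exact hge q hq
        rw [hdec]
        have hlen : (P.length : Int) = P₁.length + P₂.length := by rw [hsplit]; push_cast [List.length_append]; ring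
        rw [sweep_skip P₁ _ _ _ _ (by omega)]
        have hL : (P.length : Int) - P₁.length = (P₂.length : Int) := by omega
        rw [hL]
        have hz1 : (P₂.length : Int) ≠ 0 := by omega
        have hz2 : (P₂.length : Int) + 1 ≠ 0 := by omega
        simp only [sweepLoop, hz1, hz2, if_false]
        have hQlen : (Q.length : Int) = (P₂.length : Int) + 1 := by
          have := hQperm.length_eq
          push_cast [this, List.length_cons]
          ring
        rw [← hQlen]
        have hrec := ih Q c0 (max M b) merged
          (by intro h; rw [h] at hQlen; simp at hQlen; omega)
          (List.Pairwise.orderedInsert _ _ hpw2)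
          (by
            rcases le_total M b with h | h
            · rw [max_eq_right h]
              exact (List.mem_orderedInsert _).mpr (Or.inl rfl)
            · rw [max_eq_left h]
              exact (List.mem_orderedInsert _).mpr (Or.inr hm2))
          (by
            intro q hq
            rcases (List.mem_orderedInsert _).mp hq with rfl | hq
            · omega
            · have := hub q (hsplit ▸ List.mem_append.mpr (Or.inr hq))
              omega)
          htp htab
        rw [hrec, mergeScan, if_pos hc]
      · -- the open group closes before a
        have hlt : ∀ p ∈ P, p < a := fun p hp => by have := hub p hp; omega
        have hdec : PySem.List.sorted (pvEnd P ++ pvEvts ((a, b) :: t)) pvEkey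
            = pvEnd P ++ (a, 1) :: PySem.List.sorted (pvEnd [b + 1] ++ pvEvts t) pvEkey := by
          apply sorted_eq_decomp _ _ _ _ _ ?_ hlt hpw ?_ hts' htab
          · exact List.Perm.refl _
          · intro q hq
            simp only [List.mem_singleton] at hq
            omega
        rw [hdec, sweep_ends P (M + 1) c0 merged _ hne hpw hmem hub]
        simp only [sweepLoop]
        norm_num
        have hrec := ih [b + 1] a b (merged ++ [(c0, M)])
          (by simp) (by simp) (by simp) (by simp) htp htab
        simp only [List.length_cons, List.length_nil] at hrec
        push_cast at hrec
        rw [hrec, mergeScan, if_neg hc]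
        simp [List.append_assoc]


-- the per-row equivalence: sweep over sorted events = sort-and-scan merge
lemma sweep_eq_merge (ints : List (Int × Int)) (h : ∀ p ∈ ints, p.1 ≤ p.2) :
    sweepLoop 0 0 [] (PySem.List.sorted2 (pvEvts ints) (fun e => e.1) (fun e => -e.2))
      = merge_intervals ints := by
  rw [sorted2_eq_sorted_lex, show (fun (e : Int × Int) => toLex (e.1, -e.2)) = pvEkey from rfl]
  by_cases hnil : ints = []
  · subst hnil; rfl
  · unfold merge_intervals
    rw [if_neg hnil, sorted2_eq_sorted_lex]
    have hsperm : (PySem.List.sorted ints (fun p => toLex (p.1, p.2))).Perm ints :=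
      PySem.List.sorted_perm ..
    have hpair := PySem.List.sorted_pairwise ints (fun p => toLex (p.1, p.2))
    rcases hseq : PySem.List.sorted ints (fun p => toLex (p.1, p.2)) with _ | ⟨⟨c0, c1⟩, t⟩
    · exact absurd ((PySem.List.sorted_eq_nil_iff ..).mp hseq) hnil
    · rw [hseq] at hsperm hpair
      have hsab : ∀ p ∈ (c0, c1) :: t, p.1 ≤ p.2 := fun p hp => h p (hsperm.subset hp)
      have hfst : List.Pairwise (fun (p q : Int × Int) => p.1 ≤ q.1) ((c0, c1) :: t) := by
        refine hpair.imp ?_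
        intro x y hxy
        rcases Prod.Lex.toLex_le_toLex.mp hxy with h' | ⟨h', _⟩ <;> omega
      rcases List.pairwise_cons.mp hfst with ⟨hts, htp⟩
      have hc01 : c0 ≤ c1 := hsab (c0, c1) (by simp)
      have hev : PySem.List.sorted (pvEvts ints) pvEkey
          = PySem.List.sorted (pvEvts ((c0, c1) :: t)) pvEkey := by
        apply PySem.List.sorted_eq_sorted_of_perm _ _ _ pvEkey_inj
        exact List.Perm.flatMap hsperm.symm (fun _ _ => List.Perm.refl _)
      have hdec : PySem.List.sorted (pvEvts ((c0, c1) :: t)) pvEkey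
          = pvEnd [] ++ (c0, 1) :: PySem.List.sorted (pvEnd [c1 + 1] ++ pvEvts t) pvEkey := by
        apply sorted_eq_decomp _ _ _ _ _ ?_ (by simp) (by simp) ?_
          (fun p hp => hts p hp) (fun p hp => hsab p (by simp [hp]))
        · have he : pvEvts ((c0, c1) :: t)
              = pvEnd [] ++ (c0, 1) :: (pvEnd [c1 + 1] ++ pvEvts t) := by
            simp [pvEvts, pvEnd]
          rw [he]
        · intro q hq
          simp only [List.mem_singleton] at hq
          omega
      rw [hev, hdec]
      simp only [pvEnd, List.map_nil, List.nil_append, sweepLoop]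
      norm_num
      have := sweep_scan t [c1 + 1] c0 c1 [] (by simp) (by simp) (by simp) (by simp) htp
        (fun p hp => hsab p (by simp [hp]))
      simpa using this

lemma pvEvts_eq_nil_iff (s : List (Int × Int)) : pvEvts s = [] ↔ s = [] := by
  cases s with
  | nil => simp [pvEvts]
  | cons p t => simp [pvEvts]

-- the branch bodies of the two row loops agree
lemma row_core (ints evs : List (Int × Int)) (hev : evs = pvEvts ints)
    (h : ∀ p ∈ ints, p.1 ≤ p.2) (acc : PySem.Dict Int (List (Int × Int))) (y : Int) :
    (if ints = [] then acc else acc.insert y (merge_intervals ints))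
      = (if evs = [] then acc
         else acc.insert y (sweepLoop 0 0 [] (PySem.List.sorted2 evs (fun e => e.1) (fun e => -e.2)))) := by
  subst hev
  by_cases hn : ints = []
  · simp [hn, pvEvts]
  · rw [if_neg hn, if_neg (fun hh => hn ((pvEvts_eq_nil_iff ints).mp hh)),
      sweep_eq_merge ints h]

lemma pvEvts_map_diag (BL : List Int) :
    pvEvts (BL.map (fun x => (x, x))) = BL.flatMap (fun x => [(x, 1), (x + 1, -1)]) := by
  induction BL with
  | nil => simp [pvEvts]
  | cons x t ih => simp [pvEvts] at ih ⊢; simp [ih]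

lemma foldl_ev_int (IL : List (Int × Int)) (init : List (Int × Int)) :
    IL.foldl (fun es p => es ++ [(p.1, 1)] ++ [(p.2 + 1, -1)]) init = init ++ pvEvts IL := by
  rw [show (fun (es : List (Int × Int)) (p : Int × Int) => es ++ [(p.1, 1)] ++ [(p.2 + 1, -1)])
      = fun es p => es ++ [(p.1, 1), (p.2 + 1, -1)] by funext es p; simp]
  exact PySem.List.foldl_append_eq_flatMap _ _ _

lemma foldl_ev_bnd (BL : List Int) (init : List (Int × Int)) :
    BL.foldl (fun es x => es ++ [(x, 1)] ++ [(x + 1, -1)]) init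
      = init ++ pvEvts (BL.map (fun x => (x, x))) := by
  rw [pvEvts_map_diag,
    show (fun (es : List (Int × Int)) (x : Int) => es ++ [(x, 1)] ++ [(x + 1, -1)])
      = fun es x => es ++ [(x, 1), (x + 1, -1)] by funext es x; simp]
  exact PySem.List.foldl_append_eq_flatMap _ _ _

-- a property of all dict values transfers to getD
lemma dict_getD_prop {ν : Type} (l : List (Int × ν)) (y : Int) (d : ν) (C : ν → Prop)
    (hd : C d) (h : ∀ kv ∈ l, kv.1 = y → C kv.2) : C ((PySem.Dict.mk l).getD y d) := by
  induction l with
  | nil => simpa [PySem.Dict.getD, PySem.Dict.get?] using hd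
  | cons kv rest ih =>
      simp only [PySem.Dict.getD, PySem.Dict.get?, List.find?_cons] at ih ⊢
      by_cases hk : (kv.1 == y) = true
      · simp [hk]
        exact h kv (by simp) (eq_of_beq hk)
      · simp only [hk, if_false]
        exact ih (fun kv' hkv' => h kv' (by simp [hkv']))

-- ===== VERDICT (by name: the statement is the Claim_ definition above) =====
theorem build_allowed_spec : Claim_equal_build_allowed := by
  intro ri rb miny maxy _hdom hpre
  unfold Spec_build_allowed build_allowed build_allowed_alt
  congr 1
  apply PySem.List.foldl_congr_mem
  intro acc y hy
  rw [PySem.List.mem_pyRange_one] at hy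
  simp only
  by_cases hI : (PySem.Dict.mk ri).contains y = true <;>
    by_cases hB : (PySem.Dict.mk rb).contains y = true <;>
      simp only [hI, hB, if_true, if_false, Bool.false_eq_true, List.nil_append,
        PySem.List.foldl_append_singleton_eq_map, foldl_ev_int, foldl_ev_bnd] <;>
    [skip; skip; skip]
  · -- both present
    refine row_core _ _ ?_ ?_ acc y
    · simp [pvEvts, List.flatMap_append]
    · intro p hp
      rcases List.mem_append.mp hp with h | h
      · exact dict_getD_prop ri y [] (fun L => ∀ q ∈ L, q.1 ≤ q.2) (by simp)
          (fun kv hkv hkey => hpre kv hkv (by omega)) p h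
      · obtain ⟨x, _, rfl⟩ := List.mem_map.mp h
        exact le_refl _
  · -- interior only
    refine row_core _ _ ?_ ?_ acc y
    · simp
    · intro p hp
      exact dict_getD_prop ri y [] (fun L => ∀ q ∈ L, q.1 ≤ q.2) (by simp)
        (fun kv hkv hkey => hpre kv hkv (by omega)) p (by simpa using hp)
  · -- boundary only
    refine row_core _ _ ?_ ?_ acc y
    · simp [pvEvts]
    · intro p hp
      obtain ⟨x, _, rfl⟩ := List.mem_map.mp (by simpa using hp)
      exact le_refl _
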